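-- pv_equiv track=rewrite | github.com/biocore/emperor | emperor/qiime_backports/util.py | is_valid_git_refname
-- ===== SOURCE A (Python) =====
-- def is_valid_git_refname(refname):
--     """check if a string is a valid branch-name/ref-name for git
--
--     Input:
--     refname: string to validate
--
--     Output:
--     True if 'refname' is a valid branch name in git. False if it fails to meet
--     any of the criteria described in the man page for 'git check-ref-format',
--     also see:
--
--     http://www.kernel.org/pub/software/scm/git/docs/git-check-ref-format.html
--     """
--     if len(refname) == 0:
--         return False
--
--     # git imposes a few requirements to accept a string as a refname/branch-name
--
--     # They can include slash / for hierarchical (directory) grouping, but no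
--     # slash-separated component can begin with a dot . or end with the sequence
--     # .lock
--     if (len([True for element in refname.split('/')\
--             if element.startswith('.') or element.endswith('.lock')]) != 0):
--         return False
--
--     # They cannot have two consecutive dots .. anywhere
--     if '..' in refname:
--         return False
--
--     # They cannot have ASCII control characters (i.e. bytes whose values are
--     # lower than \040, or \177 DEL), space, tilde, caret ^, or colon : anywhere
--     if len([True for refname_char in refname if ord(refname_char) < 40 or\
--             ord(refname_char) == 177 ]) != 0:
--         return False
--     if ' ' in refname or '~' in refname or '^' in refname or ':' in refname:
--         return False
--
--     # They cannot have question-mark ?, asterisk *, or open bracket [ anywhere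
--     if '?' in refname or '*' in refname or '[' in refname:
--         return False
--
--     # They cannot begin or end with a slash / or contain multiple consecutive
--     # slashes
--     if refname.startswith('/') or refname.endswith('/') or '//' in refname:
--         return False
--
--     # They cannot end with a dot ..
--     if refname.endswith('.'):
--         return False
--
--     # They cannot contain a sequence @{
--     if '@{' in refname:
--         return False
--
--     # They cannot contain a \
--     if '\\' in refname:
--         return False
--
--     return True
-- ===== SOURCE B (Python) =====
-- def is_valid_git_refname(refname):
--     """Single forward pass over the characters, maintaining the previous
--     character and the current slash-component, instead of A's many separate
--     scans/substring searches."""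
--     if not refname:
--         return False
--     ok = True
--     prev = ''   # previous character ('' before the first one)
--     comp = ''   # current slash-separated component accumulated so far
--     for ch in refname:
--         if ord(ch) < 40 or ord(ch) == 177 or ch in ' ~^:?*[\\':
--             ok = False
--         if ch == '/':
--             # a component just ended: it may not be empty (leading slash or
--             # '//') and may not end with '.lock'
--             if comp == '' or comp.endswith('.lock'):
--                 ok = False
--             comp = ''
--         else:
--             if comp == '' and ch == '.':
--                 ok = False
--             if prev == '.' and ch == '.':
--                 ok = False
--             if prev == '@' and ch == '{':
--                 ok = False
--             comp += ch
--         prev = ch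
--     # final component: nonempty (no trailing slash), no '.lock' suffix,
--     # and the whole name may not end with a dot
--     if comp == '' or comp.endswith('.lock') or prev == '.':
--         ok = False
--     return ok
-- ===== Notes on version B (the rewrite author's own statement) =====
-- stated objective: alternative
-- what changed: Replaces A's roughly ten separate scans (the split into slash-components, several substring searches, suffix/prefix tests) by a single stateful left-to-right pass that keeps the previous character and the current slash-component.
import Mathlib
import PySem

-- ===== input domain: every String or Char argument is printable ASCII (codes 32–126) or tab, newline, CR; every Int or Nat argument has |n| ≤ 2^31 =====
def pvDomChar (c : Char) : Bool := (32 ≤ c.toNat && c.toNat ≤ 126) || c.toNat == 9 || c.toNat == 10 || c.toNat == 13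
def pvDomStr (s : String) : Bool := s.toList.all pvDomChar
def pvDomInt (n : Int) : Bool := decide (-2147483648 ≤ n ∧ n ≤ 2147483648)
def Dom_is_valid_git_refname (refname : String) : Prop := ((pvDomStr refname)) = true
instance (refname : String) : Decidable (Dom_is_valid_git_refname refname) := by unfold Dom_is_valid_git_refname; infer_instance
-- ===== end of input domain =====

-- B replaces A's many separate scans (split, substring searches, suffix/prefix tests)
-- by one stateful left-to-right pass over the characters (objective: alternative).

-- ===== PORT A =====
def is_valid_git_refname (refname : String) : Bool :=
  let cs := refname.toList
  if cs.length = 0 then false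
  else if (((PySem.Chars.splitOn cs ['/']).filter
      (fun element => PySem.Chars.startswith element ['.'] ||
        PySem.Chars.endswith element ['.','l','o','c','k'])).map (fun _ => true)).length ≠ 0 then false
  else if PySem.Chars.isIn ['.','.'] cs then false
  else if ((cs.filter (fun c => decide (c.toNat < 40) || decide (c.toNat = 177))).map
      (fun _ => true)).length ≠ 0 then false
  else if PySem.Chars.isIn [' '] cs || PySem.Chars.isIn ['~'] cs || PySem.Chars.isIn ['^'] cs ||
      PySem.Chars.isIn [':'] cs then false
  else if PySem.Chars.isIn ['?'] cs || PySem.Chars.isIn ['*'] cs || PySem.Chars.isIn ['['] cs then false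
  else if PySem.Chars.startswith cs ['/'] || PySem.Chars.endswith cs ['/'] ||
      PySem.Chars.isIn ['/','/'] cs then false
  else if PySem.Chars.endswith cs ['.'] then false
  else if PySem.Chars.isIn ['@','{'] cs then false
  else if PySem.Chars.isIn ['\\'] cs then false
  else true

-- ===== PORT B =====
-- one loop step of Source B: state = (ok, prev as 0/1-char list, current component)
def altStep (st : Bool × List Char × List Char) (ch : Char) : Bool × List Char × List Char :=
  let ok := st.1
  let prev := st.2.1
  let comp := st.2.2
  let ok := if ch.toNat < 40 || ch.toNat = 177 || [' ','~','^',':','?','*','[','\\'].contains ch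
            then false else ok
  if ch = '/' then
    ((if comp = [] || PySem.Chars.endswith comp ['.','l','o','c','k'] then false else ok), ([ch], []))
  else
    let ok := if comp = [] ∧ ch = '.' then false else ok
    let ok := if prev = ['.'] ∧ ch = '.' then false else ok
    let ok := if prev = ['@'] ∧ ch = '{' then false else ok
    (ok, ([ch], comp ++ [ch]))

def is_valid_git_refname_alt (refname : String) : Bool :=
  let cs := refname.toList
  if cs = [] then false
  else
    let st := cs.foldl altStep (true, ([], []))
    if st.2.2 = [] || PySem.Chars.endswith st.2.2 ['.','l','o','c','k'] || st.2.1 = ['.']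
    then false else st.1

-- ===== PRECONDITION & SPEC =====
def Spec_is_valid_git_refname (refname : String) (out : Bool) : Prop := out = is_valid_git_refname_alt refname
instance (refname : String) (out : Bool) : Decidable (Spec_is_valid_git_refname refname out) := by unfold Spec_is_valid_git_refname; infer_instance

-- ===== CLAIM (what is proved, stated in full; the proofs are below) =====
def Claim_equal_is_valid_git_refname : Prop := ∀ (refname : String), Dom_is_valid_git_refname refname → Spec_is_valid_git_refname refname (is_valid_git_refname refname)

-- ===== LEMMAS AND PROOFS =====

-- helper defs
def isBadC (c : Char) : Bool :=
  c.toNat < 40 || c.toNat = 177 || [' ','~','^',':','?','*','[','\\'].contains c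

def lastCompC (cs : List Char) : List Char := (cs.reverse.takeWhile (fun c => c != '/')).reverse

def prevOfC (cs : List Char) : List Char :=
  match cs.getLast? with | none => [] | some c => [c]

def mySplit (cur : List Char) : List Char → List (List Char)
  | [] => [cur]
  | c :: rest => if c = '/' then cur :: mySplit [] rest else mySplit (cur ++ [c]) rest

-- Bool-level bridges
theorem isIn_cons (p : List Char) (c : Char) (l : List Char) :
    PySem.Chars.isIn p (c :: l) = (PySem.Chars.startswith (c :: l) p || PySem.Chars.isIn p l) := by
  rw [Bool.eq_iff_iff]
  simp [PySem.Chars.isIn_iff_infix, PySem.Chars.startswith_iff, List.infix_cons_iff]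

theorem suffix_snoc_iff (p l : List Char) (c : Char) :
    p <:+ (l ++ [c]) ↔ p.reverse <+: c :: l.reverse := by
  rw [show (c :: l.reverse) = (l ++ [c]).reverse by simp, List.reverse_prefix]

theorem isIn_snoc (p : List Char) (l : List Char) (c : Char) :
    PySem.Chars.isIn p (l ++ [c]) = (PySem.Chars.isIn p l || PySem.Chars.endswith (l ++ [c]) p) := by
  rw [Bool.eq_iff_iff]
  have h1 : p <:+: (l ++ [c]) ↔ p.reverse <:+: c :: l.reverse := by
    rw [show (c :: l.reverse) = (l ++ [c]).reverse by simp, List.reverse_infix]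
  simp only [PySem.Chars.isIn_iff_infix, Bool.or_eq_true, PySem.Chars.endswith_iff]
  rw [h1, List.infix_cons_iff, ← suffix_snoc_iff, List.reverse_infix, or_comm]

theorem endswith_snoc (p : List Char) (x : Char) (l : List Char) (c : Char) :
    PySem.Chars.endswith (l ++ [c]) (p ++ [x]) = (decide (c = x) && PySem.Chars.endswith l p) := by
  rw [Bool.eq_iff_iff]
  simp only [PySem.Chars.endswith_iff, Bool.and_eq_true, decide_eq_true_eq]
  rw [suffix_snoc_iff]
  simp only [List.reverse_append, List.reverse_cons, List.reverse_nil, List.nil_append,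
    List.singleton_append, List.cons_prefix_cons, List.reverse_prefix]
  tauto

theorem endswith_singleton_snoc (l : List Char) (c x : Char) :
    PySem.Chars.endswith (l ++ [c]) [x] = decide (c = x) := by
  have := endswith_snoc [] x l c
  simpa [PySem.Chars.endswith] using this

theorem endswith_eq_prevOf (l : List Char) (x : Char) :
    PySem.Chars.endswith l [x] = decide (prevOfC l = [x]) := by
  induction l using List.reverseRecOn with
  | nil => simp [PySem.Chars.endswith, prevOfC]
  | append_singleton l c _ =>
    rw [endswith_singleton_snoc]
    simp [prevOfC, List.getLast?_concat]

theorem startswith_snoc (l : List Char) (c x : Char) :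
    PySem.Chars.startswith (l ++ [c]) [x] =
      (if l = [] then decide (c = x) else PySem.Chars.startswith l [x]) := by
  cases l with
  | nil =>
    rw [if_pos rfl, List.nil_append, Bool.eq_iff_iff]
    simp only [PySem.Chars.startswith_iff, List.cons_prefix_cons, List.nil_prefix,
      and_true, decide_eq_true_eq]
    exact eq_comm
  | cons a t =>
    simp only [List.cons_append, if_neg (List.cons_ne_nil a t)]
    rw [Bool.eq_iff_iff]
    simp [PySem.Chars.startswith_iff, List.cons_prefix_cons]

theorem lastComp_snoc (l : List Char) (c : Char) :
    lastCompC (l ++ [c]) = if c = '/' then [] else lastCompC l ++ [c] := by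
  unfold lastCompC
  simp only [List.reverse_append, List.reverse_cons, List.reverse_nil, List.nil_append,
    List.singleton_append, List.takeWhile_cons]
  by_cases hc : c = '/'
  · simp [hc]
  · simp [hc, bne_iff_ne]

theorem lastComp_eq_nil (l : List Char) :
    (lastCompC l = []) ↔ (l = [] ∨ prevOfC l = ['/']) := by
  induction l using List.reverseRecOn with
  | nil => simp [lastCompC, prevOfC]
  | append_singleton l c _ =>
    rw [lastComp_snoc]
    by_cases hc : c = '/' <;> simp [hc, prevOfC, List.getLast?_concat]

-- prefix through a slash: a slash-free prefix cannot reach past an explicit '/'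
theorem prefix_slash_free (p : List Char) (hp : '/' ∉ p) :
    ∀ (w z : List Char), (p <+: w ++ '/' :: z ↔ p <+: w) := by
  induction p with
  | nil => intro w z; simp
  | cons a q ih =>
    intro w z
    cases w with
    | nil =>
      simp only [List.nil_append, List.cons_prefix_cons]
      constructor
      · rintro ⟨rfl, -⟩; exact absurd (List.mem_cons_self) hp
      · intro h; exact absurd h (by simp)
    | cons b w' =>
      simp only [List.cons_append, List.cons_prefix_cons]
      constructor
      · rintro ⟨rfl, h⟩; exact ⟨rfl, (ih (by simp_all) w' z).mp h⟩
      · rintro ⟨rfl, h⟩; exact ⟨rfl, (ih (by simp_all) w' z).mpr h⟩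

-- G: slash-free p, w: p++['/'] is a prefix of w ++ '/'::v iff p = w
theorem prefix_slash_eq (p : List Char) (hp : '/' ∉ p) :
    ∀ (w v : List Char), '/' ∉ w → ((p ++ ['/']) <+: w ++ '/' :: v ↔ p = w) := by
  induction p with
  | nil =>
    intro w v hw
    cases w with
    | nil => simp
    | cons b w' =>
      simp only [List.nil_append, List.cons_append, List.cons_prefix_cons]
      constructor
      · rintro ⟨rfl, -⟩; exact absurd (List.mem_cons_self) hw
      · intro h; exact absurd h (by simp)
  | cons a q ih =>
    intro w v hw
    cases w with
    | nil =>
      simp only [List.cons_append, List.nil_append, List.cons_prefix_cons]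
      constructor
      · rintro ⟨rfl, -⟩; exact absurd (List.mem_cons_self) hp
      · intro h; exact absurd h (by simp)
    | cons b w' =>
      simp only [List.cons_append, List.cons_prefix_cons]
      have := ih (by simp_all) w' v (by simp_all)
      constructor
      · rintro ⟨rfl, h⟩; rw [this.mp h]
      · intro h
        injection h with h1 h2
        subst h1; subst h2
        exact ⟨rfl, this.mpr rfl⟩

theorem prefix_takeWhile_slash (p : List Char) (hp : '/' ∉ p) :
    ∀ (xs : List Char), (p <+: xs.takeWhile (fun c => c != '/') ↔ p <+: xs) := by
  induction p with
  | nil => intro xs; simp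
  | cons a q ih =>
    intro xs
    cases xs with
    | nil => exact Iff.rfl
    | cons x xs' =>
      rw [List.takeWhile_cons]
      by_cases hx : x = '/'
      · subst hx
        rw [if_neg (by simp)]
        constructor
        · intro h; exact absurd h (by simp)
        · intro h
          rcases List.cons_prefix_cons.mp h with ⟨rfl, -⟩
          exact absurd List.mem_cons_self hp
      · rw [if_pos (by simp [hx])]
        simp only [List.cons_prefix_cons]
        exact and_congr_right fun _ => ih (by simp_all) xs'

-- a slash-free suffix of l is a suffix of its last component, and conversely
theorem endswith_lastComp (L l : List Char) (hL : '/' ∉ L) :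
    PySem.Chars.endswith (lastCompC l) L = PySem.Chars.endswith l L := by
  rw [Bool.eq_iff_iff]
  simp only [PySem.Chars.endswith_iff]
  rw [← List.reverse_prefix, ← List.reverse_prefix (l₁ := L)]
  unfold lastCompC
  rw [List.reverse_reverse]
  exact prefix_takeWhile_slash L.reverse (by simpa using hL) l.reverse

-- F1: slash-free suffix through an explicit slash
theorem endswith_through_slash (L u v : List Char) (hL : '/' ∉ L) :
    PySem.Chars.endswith (u ++ '/' :: v) L = PySem.Chars.endswith v L := by
  rw [Bool.eq_iff_iff]
  simp only [PySem.Chars.endswith_iff]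
  rw [← List.reverse_prefix, ← List.reverse_prefix (l₁ := L)]
  rw [show (u ++ '/' :: v).reverse = v.reverse ++ '/' :: u.reverse by simp]
  exact prefix_slash_free L.reverse (by simpa using hL) v.reverse u.reverse

-- F2: occurrences of L++"/" in u ++ "/" :: v (u, L slash-free)
theorem isIn_lock_slash (L u v : List Char) (hL : '/' ∉ L) (hu : '/' ∉ u) :
    PySem.Chars.isIn (L ++ ['/']) (u ++ '/' :: v) =
      (PySem.Chars.endswith u L || PySem.Chars.isIn (L ++ ['/']) v) := by
  induction u with
  | nil =>
    rw [List.nil_append, isIn_cons, Bool.eq_iff_iff]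
    simp only [Bool.or_eq_true, PySem.Chars.startswith_iff, PySem.Chars.endswith_iff]
    rw [show ('/' :: v) = ([] ++ '/' :: v) by simp, prefix_slash_eq L hL [] v (by simp)]
    simp [List.suffix_nil]
  | cons a u' ih =>
    have ha : a ≠ '/' := by intro h; exact hu (h ▸ List.mem_cons_self)
    rw [List.cons_append, isIn_cons, ih (by simp_all), Bool.eq_iff_iff]
    simp only [Bool.or_eq_true, PySem.Chars.startswith_iff, PySem.Chars.endswith_iff]
    rw [show (a :: (u' ++ '/' :: v)) = ((a :: u') ++ '/' :: v) by simp,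
      prefix_slash_eq L hL (a :: u') v hu, List.suffix_cons_iff]
    tauto

def okSpecC (cs : List Char) : Bool :=
  !(cs.any isBadC) && !(PySem.Chars.isIn ['.','.'] cs) && !(PySem.Chars.isIn ['@','{'] cs) &&
  !(PySem.Chars.startswith cs ['/'] || PySem.Chars.isIn ['/','/'] cs) &&
  !(PySem.Chars.startswith cs ['.'] || PySem.Chars.isIn ['/','.'] cs) &&
  !(PySem.Chars.isIn ['.','l','o','c','k','/'] cs)

theorem isIn_pair_snoc (a b : Char) (l : List Char) (c : Char) :
    PySem.Chars.isIn [a, b] (l ++ [c]) =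
      (PySem.Chars.isIn [a, b] l || (decide (c = b) && decide (prevOfC l = [a]))) := by
  rw [isIn_snoc, show [a, b] = [a] ++ [b] from rfl, endswith_snoc, endswith_eq_prevOf]

theorem isIn_lock_snoc (l : List Char) (c : Char) :
    PySem.Chars.isIn ['.','l','o','c','k','/'] (l ++ [c]) =
      (PySem.Chars.isIn ['.','l','o','c','k','/'] l ||
        (decide (c = '/') && PySem.Chars.endswith (lastCompC l) ['.','l','o','c','k'])) := by
  rw [isIn_snoc, show ['.','l','o','c','k','/'] = ['.','l','o','c','k'] ++ ['/'] from rfl,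
    endswith_snoc, endswith_lastComp _ _ (by decide)]

theorem fold_alt (cs : List Char) :
    cs.foldl altStep (true, ([], [])) = (okSpecC cs, (prevOfC cs, lastCompC cs)) := by
  induction cs using List.reverseRecOn with
  | nil => decide
  | append_singleton l c ih =>
    rw [List.foldl_append, ih, List.foldl_cons, List.foldl_nil]
    have hprev : prevOfC (l ++ [c]) = [c] := by simp [prevOfC]
    unfold altStep okSpecC
    simp only [List.any_append, List.any_cons, List.any_nil, Bool.or_false,
      isIn_pair_snoc, isIn_lock_snoc, startswith_snoc, hprev, lastComp_snoc l c]
    by_cases hc : c = '/'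
    · subst hc
      by_cases hl : l = []
      · subst hl; decide
      · have hn : (lastCompC l = []) ↔ (prevOfC l = ['/']) := by
          rw [lastComp_eq_nil]; simp [hl]
        by_cases hpd : prevOfC l = ['/'] <;>
          by_cases hed : PySem.Chars.endswith (lastCompC l) ['.','l','o','c','k'] = true <;>
          simp [hn, hpd, hed, hl, isBadC, Prod.mk.injEq]
    · have hn : (lastCompC l = []) ↔ (l = [] ∨ prevOfC l = ['/']) := lastComp_eq_nil l
      by_cases hl : l = []
      · subst hl
        by_cases hd : c = '.' <;> by_cases hb : c = '{' <;>
          simp [hn, hc, hd, hb, isBadC, prevOfC, lastCompC, Prod.mk.injEq] <;>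
          first
          | tauto
          | (rw [Bool.eq_iff_iff]; simp only [Bool.and_eq_true, Bool.not_eq_true']; tauto)
      · by_cases hd : c = '.' <;> by_cases hb : c = '{' <;>
          by_cases h1 : prevOfC l = ['.'] <;> by_cases h2 : prevOfC l = ['@'] <;>
          by_cases h3 : prevOfC l = ['/'] <;>
          simp [hn, hc, hd, hb, h1, h2, h3, hl, isBadC, Prod.mk.injEq] <;>
          first
          | tauto
          | (rw [Bool.eq_iff_iff]; simp only [Bool.and_eq_true, Bool.not_eq_true']; tauto)

theorem splitOn_go_eq : ∀ (fuel : Nat) (l cur acc : List Char) (acc2 : List (List Char)),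
    l.length < fuel →
    PySem.Chars.splitOn.go ['/'] fuel l cur acc2 = acc2.reverse ++ mySplit cur.reverse l := by
  intro fuel
  induction fuel with
  | zero => intro l cur acc acc2 h; omega
  | succ f ih =>
    intro l cur acc acc2 h
    cases l with
    | nil => simp [PySem.Chars.splitOn.go, mySplit]
    | cons c rest =>
      by_cases hc : c = '/'
      · subst hc
        have : PySem.Chars.splitOn.go ['/'] (f+1) ('/' :: rest) cur acc2 =
            PySem.Chars.splitOn.go ['/'] f rest [] (cur.reverse :: acc2) := by
          simp [PySem.Chars.splitOn.go, List.isPrefixOf]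
        rw [this, ih rest [] acc (cur.reverse :: acc2) (by simpa using Nat.lt_of_succ_lt_succ h)]
        simp [mySplit]
      · have : PySem.Chars.splitOn.go ['/'] (f+1) (c :: rest) cur acc2 =
            PySem.Chars.splitOn.go ['/'] f rest (c :: cur) acc2 := by
          simp only [PySem.Chars.splitOn.go, List.isPrefixOf, Bool.and_eq_true, beq_iff_eq]
          rw [if_neg (by rintro ⟨h1, -⟩; exact hc h1.symm)]
        rw [this, ih rest (c :: cur) acc acc2 (by simpa using Nat.lt_of_succ_lt_succ h)]
        simp [mySplit, hc]

theorem splitOn_eq_mySplit (cs : List Char) :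
    PySem.Chars.splitOn cs ['/'] = mySplit [] cs := by
  rw [PySem.Chars.splitOn, splitOn_go_eq (cs.length + 1) cs [] [] [] (by omega)]
  simp

theorem startswith_pair (a b c : Char) (l : List Char) :
    PySem.Chars.startswith (c :: l) [a, b] = (decide (a = c) && PySem.Chars.startswith l [b]) := by
  rw [Bool.eq_iff_iff]
  simp [PySem.Chars.startswith_iff, List.cons_prefix_cons]

theorem startswith_append_single (cur cs : List Char) (x : Char) :
    PySem.Chars.startswith (cur ++ cs) [x] =
      (if cur = [] then PySem.Chars.startswith cs [x] else PySem.Chars.startswith cur [x]) := by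
  cases cur with
  | nil => simp
  | cons a t =>
    rw [if_neg (List.cons_ne_nil a t), Bool.eq_iff_iff]
    simp [PySem.Chars.startswith_iff, List.cons_prefix_cons]

theorem mySplit_any_startdot : ∀ (cs cur : List Char),
    (mySplit cur cs).any (fun e => PySem.Chars.startswith e ['.']) =
      (PySem.Chars.startswith (cur ++ cs) ['.'] || PySem.Chars.isIn ['/','.'] cs) := by
  intro cs
  induction cs with
  | nil =>
    intro cur
    simp only [mySplit, List.any_cons, List.any_nil, Bool.or_false, List.append_nil]
    rw [show PySem.Chars.isIn ['/','.'] [] = false from by decide]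
    simp
  | cons c rest ih =>
    intro cur
    by_cases hc : c = '/'
    · subst hc
      rw [show mySplit cur ('/' :: rest) = cur :: mySplit [] rest from by simp [mySplit]]
      simp only [List.any_cons]
      rw [ih [], isIn_cons, startswith_pair, List.nil_append,
        startswith_append_single cur ('/' :: rest) '.']
      by_cases hcur : cur = []
      · subst hcur
        rw [if_pos rfl, Bool.eq_iff_iff]
        simp [PySem.Chars.startswith_iff, List.cons_prefix_cons]
      · rw [if_neg hcur, Bool.eq_iff_iff]
        simp
    · simp only [mySplit, if_neg hc]
      rw [ih (cur ++ [c]), isIn_cons, startswith_pair]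
      rw [show decide ('/' = c) = false from by simp [Ne.symm hc]]
      simp [List.append_assoc]

theorem noSlash_not_isIn_lock (s : List Char) (hs : '/' ∉ s) :
    PySem.Chars.isIn ['.','l','o','c','k','/'] s = false := by
  rw [PySem.Chars.isIn_eq_false_iff]
  intro h
  exact hs (h.sublist.subset (by simp))

theorem mySplit_any_endlock : ∀ (cs cur : List Char), '/' ∉ cur →
    (mySplit cur cs).any (fun e => PySem.Chars.endswith e ['.','l','o','c','k']) =
      (PySem.Chars.isIn ['.','l','o','c','k','/'] (cur ++ cs) ||
        PySem.Chars.endswith (cur ++ cs) ['.','l','o','c','k']) := by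
  intro cs
  induction cs with
  | nil =>
    intro cur hcur
    simp only [mySplit, List.any_cons, List.any_nil, Bool.or_false, List.append_nil]
    rw [noSlash_not_isIn_lock cur hcur]
    simp
  | cons c rest ih =>
    intro cur hcur
    by_cases hc : c = '/'
    · subst hc
      rw [show mySplit cur ('/' :: rest) = cur :: mySplit [] rest from by simp [mySplit]]
      simp only [List.any_cons]
      rw [ih [] (by simp), List.nil_append,
        show ['.','l','o','c','k','/'] = ['.','l','o','c','k'] ++ ['/'] from rfl,
        isIn_lock_slash _ _ _ (by decide) hcur,
        endswith_through_slash _ _ _ (by decide)]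
      rw [Bool.eq_iff_iff]
      simp
      try tauto
    · simp only [mySplit, if_neg hc]
      rw [ih (cur ++ [c]) (by
        intro h
        rcases List.mem_append.mp h with h | h
        · exact hcur h
        · exact hc (List.mem_singleton.mp h).symm)]
      simp [List.append_assoc]

theorem any_orB {α : Type} (l : List α) (p q : α → Bool) :
    l.any (fun c => p c || q c) = (l.any p || l.any q) := by
  induction l with
  | nil => rfl
  | cons a t ih =>
    simp only [List.any_cons, ih]
    rw [Bool.eq_iff_iff]
    simp only [Bool.or_eq_true]
    tauto

theorem isIn_singleton (x : Char) (cs : List Char) :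
    PySem.Chars.isIn [x] cs = cs.contains x := by
  rw [Bool.eq_iff_iff]
  simp [PySem.Chars.isIn_iff_infix, List.singleton_infix_iff]

theorem any_contains (cs ws : List Char) :
    cs.any (fun c => ws.contains c) = ws.any (fun w => cs.contains w) := by
  rw [Bool.eq_iff_iff]
  simp only [List.any_eq_true, List.contains_iff_mem]
  constructor <;> rintro ⟨x, h1, h2⟩ <;> exact ⟨x, h2, h1⟩

theorem badchar_decomp (cs : List Char) :
    cs.any isBadC =
      ((cs.any (fun c => decide (c.toNat < 40) || decide (c.toNat = 177)) ||
        (cs.contains ' ' || cs.contains '~' || cs.contains '^' || cs.contains ':')) ||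
       ((cs.contains '?' || cs.contains '*' || cs.contains '[') || cs.contains '\\')) := by
  have h1 : isBadC = fun c => (decide (c.toNat < 40) || decide (c.toNat = 177)) ||
      [' ','~','^',':','?','*','[','\\'].contains c := by
    funext c
    simp [isBadC, Bool.or_assoc]
  rw [h1, any_orB cs (fun c => decide (c.toNat < 40) || decide (c.toNat = 177))
      (fun c => [' ','~','^',':','?','*','[','\\'].contains c),
    any_contains cs [' ','~','^',':','?','*','[','\\']]
  simp only [List.any_cons, List.any_nil, Bool.or_false, Bool.or_assoc]

theorem filterlen_ne_zero (l : List (List Char)) (p : List Char → Bool) :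
    ((((l.filter p).map (fun _ => (true : Bool))).length ≠ 0)) ↔ l.any p = true := by
  simp [List.length_eq_zero_iff, List.filter_eq_nil_iff, List.any_eq_true]

theorem filterlen_ne_zero_c (l : List Char) (p : Char → Bool) :
    ((((l.filter p).map (fun _ => (true : Bool))).length ≠ 0)) ↔ l.any p = true := by
  simp [List.length_eq_zero_iff, List.filter_eq_nil_iff, List.any_eq_true]

theorem if_beq (b x : Bool) : (if b = true then false else x) = (!b && x) := by
  cases b <;> simp

theorem split_check (cs : List Char) :
    (mySplit [] cs).any (fun element => PySem.Chars.startswith element ['.'] ||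
        PySem.Chars.endswith element ['.','l','o','c','k']) =
      ((PySem.Chars.startswith cs ['.'] || PySem.Chars.isIn ['/','.'] cs) ||
       (PySem.Chars.isIn ['.','l','o','c','k','/'] cs ||
        PySem.Chars.endswith cs ['.','l','o','c','k'])) := by
  rw [any_orB (mySplit [] cs) (fun e => PySem.Chars.startswith e ['.'])
      (fun e => PySem.Chars.endswith e ['.','l','o','c','k']),
    mySplit_any_startdot cs [], mySplit_any_endlock cs [] (by simp)]
  simp

set_option maxHeartbeats 2000000 in
theorem main_eq (s : String) : is_valid_git_refname s = is_valid_git_refname_alt s := by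
  simp only [is_valid_git_refname, is_valid_git_refname_alt]
  by_cases h0 : s.toList = []
  · rw [if_pos (by simp [h0]), if_pos h0]
  · rw [if_neg (by simpa using h0), if_neg h0, fold_alt, splitOn_eq_mySplit]
    have e1 : decide ((okSpecC s.toList, (prevOfC s.toList, lastCompC s.toList)).2.2 = []) =
        PySem.Chars.endswith s.toList ['/'] := by
      rw [endswith_eq_prevOf]
      apply decide_eq_decide.mpr
      rw [lastComp_eq_nil]
      simp [h0]
    have e2 : decide ((okSpecC s.toList, (prevOfC s.toList, lastCompC s.toList)).2.1 = ['.']) =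
        PySem.Chars.endswith s.toList ['.'] := (endswith_eq_prevOf s.toList '.').symm
    have e3 : PySem.Chars.endswith (okSpecC s.toList,
        (prevOfC s.toList, lastCompC s.toList)).2.2 ['.','l','o','c','k'] =
        PySem.Chars.endswith s.toList ['.','l','o','c','k'] :=
      endswith_lastComp ['.','l','o','c','k'] s.toList (by decide)
    rw [e1, e2, e3]
    simp only [filterlen_ne_zero, filterlen_ne_zero_c, split_check]
    simp only [if_beq]
    rw [okSpecC, badchar_decomp]
    rw [Bool.eq_iff_iff]
    simp only [Bool.and_eq_true, Bool.or_eq_true, Bool.not_eq_true', Bool.not_eq_eq_eq_not,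
      Bool.not_or, Bool.and_assoc]
    constructor
    · intro h
      simp_all [isIn_singleton]
    · intro h
      simp_all [isIn_singleton]

-- ===== VERDICT (by name: the statement is the Claim_ definition above) =====
theorem is_valid_git_refname_spec : Claim_equal_is_valid_git_refname := by
  intro refname _
  unfold Spec_is_valid_git_refname
  exact main_eq refname
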